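-- pv_equiv track=rewrite | github.com/Sahil-IND/Querio-AI | querio_backend/app/services/text_to_sql_service.py | _should_add_limit
-- ===== SOURCE A (Python) =====
-- def _should_add_limit(sql: str) -> bool:
--     """Intelligently determine if a LIMIT clause should be added"""
--     # Split into statements
--     statements = [s.strip() for s in sql.split(';') if s.strip()]
--
--     # If any statement is an aggregate, don't add limit to entire batch
--     aggregate_functions = ['COUNT(', 'SUM(', 'AVG(', 'MIN(', 'MAX(']
--
--     for stmt in statements:
--         stmt_upper = stmt.upper()
--         for agg in aggregate_functions:
--             if agg in stmt_upper:
--                 return False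
--
--     return True
-- ===== SOURCE B (Python) =====
-- def _should_add_limit(sql: str) -> bool:
--     """Simpler: no aggregate pattern contains ';', so splitting into statements
--     cannot change which patterns occur; one uppercase pass over the whole SQL suffices."""
--     upper = sql.upper()
--     return not any(agg in upper for agg in ('COUNT(', 'SUM(', 'AVG(', 'MIN(', 'MAX('))
-- ===== Notes on version B (the rewrite author's own statement) =====
-- stated objective: simpler
-- what changed: B drops A's split-on-';'/strip/filter statement loop entirely: it uppercases the whole SQL once and tests the five aggregate substrings against the full text, which is equivalent because no pattern contains ';' or whitespace.
import Mathlib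
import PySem

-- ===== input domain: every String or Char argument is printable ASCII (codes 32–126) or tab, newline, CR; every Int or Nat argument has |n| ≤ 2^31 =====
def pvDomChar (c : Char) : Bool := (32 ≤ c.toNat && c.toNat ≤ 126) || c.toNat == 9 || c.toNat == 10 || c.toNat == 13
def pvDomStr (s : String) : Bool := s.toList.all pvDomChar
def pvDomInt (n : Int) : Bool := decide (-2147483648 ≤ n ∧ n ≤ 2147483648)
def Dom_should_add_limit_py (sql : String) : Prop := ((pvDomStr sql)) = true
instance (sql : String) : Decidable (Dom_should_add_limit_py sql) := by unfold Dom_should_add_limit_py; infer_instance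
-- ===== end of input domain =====

-- B drops A's split/strip/filter statement loop: one uppercase pass over the whole SQL and a
-- single substring test per aggregate pattern (equivalent since no pattern contains ';').

-- ===== PORT A =====
-- the fixed aggregate pattern list of A (and B)
def saAggs : List String := ["COUNT(", "SUM(", "AVG(", "MIN(", "MAX("]

-- the 'for stmt in statements' loop with its early 'return False'
def saLoop : List String → Bool
  | [] => true
  | stmt :: rest =>
    let stmtUpper := PySem.Str.upper stmt
    if saAggs.any (fun agg => PySem.Str.isIn agg stmtUpper) then false else saLoop rest

def should_add_limit_py (sql : String) : Bool :=
  -- [s.strip() for s in sql.split(';') if s.strip()] ; split? is some since ";" ≠ ""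
  -- ('if s.strip()' = string truthiness = nonempty, tested as len ≠ 0)
  let statements :=
    (((PySem.Str.split? sql ";").getD []).map PySem.Str.strip).filter
      (fun s => !(PySem.Str.len s == 0))
  saLoop statements

-- ===== PORT B =====
def should_add_limit_py_alt (sql : String) : Bool :=
  let upper := PySem.Str.upper sql
  !(["COUNT(", "SUM(", "AVG(", "MIN(", "MAX("].any (fun agg => PySem.Str.isIn agg upper))

-- ===== PRECONDITION & SPEC =====
def Spec_should_add_limit_py (sql : String) (out : Bool) : Prop := out = should_add_limit_py_alt sql
instance (sql : String) (out : Bool) : Decidable (Spec_should_add_limit_py sql out) := by unfold Spec_should_add_limit_py; infer_instance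

-- ===== CLAIM (what is proved, stated in full; the proofs are below) =====
def Claim_equal_should_add_limit_py : Prop := ∀ (sql : String), Dom_should_add_limit_py sql → Spec_should_add_limit_py sql (should_add_limit_py sql)

-- ===== LEMMAS AND PROOFS =====

-- structural model of Python's str.split(';') (current piece carried reversed)
def split1 : List Char → List Char → List (List Char)
  | [], cur => [cur.reverse]
  | c :: rest, cur => if c = ';' then cur.reverse :: split1 rest [] else split1 rest (c :: cur)

theorem go_spec (l : List Char) : ∀ (fuel : Nat) (cur : List Char) (acc : List (List Char)),
    l.length ≤ fuel →
    PySem.Chars.splitOn.go [';'] fuel l cur acc = acc.reverse ++ split1 l cur := by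
  induction l with
  | nil =>
    intro fuel cur acc _
    cases fuel with
    | zero => simp [PySem.Chars.splitOn.go, split1]
    | succ f => simp [PySem.Chars.splitOn.go, split1]
  | cons c rest ih =>
    intro fuel cur acc h
    cases fuel with
    | zero => simp at h
    | succ f =>
      rw [PySem.Chars.splitOn.go]
      by_cases hc : c = ';'
      · subst hc
        simp [List.isPrefixOf, ih _ _ _ (by simpa using h), split1]
      · have hpre : [';'].isPrefixOf (c :: rest) = false := by
          simp [List.isPrefixOf]; exact fun h' => hc h'.symm
        rw [hpre]
        simp only [Bool.false_eq_true, if_false]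
        rw [ih _ _ _ (by simpa using h)]
        simp [split1, hc]

theorem splitOn_eq_split1 (l : List Char) : PySem.Chars.splitOn l [';'] = split1 l [] := by
  rw [PySem.Chars.splitOn, go_spec] <;> simp

-- character facts about upperChar
theorem upperChar_toNat (c : Char) :
    (PySem.Chars.upperChar c).toNat =
      if 97 ≤ c.toNat ∧ c.toNat ≤ 122 then c.toNat - 32 else c.toNat := by
  have hlo : ('a' ≤ c) ↔ 97 ≤ c.toNat := by
    rw [Char.le_def]; exact ⟨fun h => h, fun h => h⟩
  have hhi : (c ≤ 'z') ↔ c.toNat ≤ 122 := by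
    rw [Char.le_def]; exact ⟨fun h => h, fun h => h⟩
  unfold PySem.Chars.upperChar PySem.Chars.islower
  by_cases h : 97 ≤ c.toNat ∧ c.toNat ≤ 122
  · rw [if_pos h]
    have hb : (decide ('a' ≤ c) && decide (c ≤ 'z')) = true := by
      simp [hlo, hhi]; omega
    rw [if_pos hb, Char.toNat_ofNat]
    have hv : (c.toNat - 32).isValidChar := Or.inl (by omega)
    simp [hv]
  · rw [if_neg h]
    have hb : (decide ('a' ≤ c) && decide (c ≤ 'z')) = false := by
      simp [hlo, hhi]; omega
    rw [if_neg (by simp [hb])]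

theorem upperChar_eq_semicolon_iff (c : Char) : PySem.Chars.upperChar c = ';' ↔ c = ';' := by
  have h := upperChar_toNat c
  constructor
  · intro hc
    rw [hc] at h
    have h59 : (';' : Char).toNat = 59 := rfl
    rw [h59] at h
    split_ifs at h with hr
    · omega
    · exact Char.ext (UInt32.toNat_inj.mp (by exact h.symm))
  · intro hc
    subst hc
    rfl

theorem isspace_upperChar (c : Char) :
    PySem.Chars.isspace (PySem.Chars.upperChar c) = PySem.Chars.isspace c := by
  have h := upperChar_toNat c
  by_cases hr : 97 ≤ c.toNat ∧ c.toNat ≤ 122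
  · rw [if_pos hr] at h
    unfold PySem.Chars.isspace
    apply Bool.eq_iff_iff.mpr
    simp only [h, Bool.or_eq_true, Bool.and_eq_true, decide_eq_true_eq]
    omega
  · rw [if_neg hr] at h
    unfold PySem.Chars.isspace
    rw [h]

-- upper = map upperChar, commuting lemmas
theorem split1_upper (l : List Char) : ∀ cur : List Char,
    split1 (l.map PySem.Chars.upperChar) (cur.map PySem.Chars.upperChar)
      = (split1 l cur).map (List.map PySem.Chars.upperChar) := by
  induction l with
  | nil => intro cur; simp [split1]
  | cons c rest ih =>
    intro cur
    simp only [List.map_cons, split1]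
    by_cases hc : c = ';'
    · subst hc
      simp [PySem.Chars.upperChar, PySem.Chars.islower]
      have := ih ([] : List Char)
      simpa using this
    · have hc' : ¬ PySem.Chars.upperChar c = ';' := fun h => hc ((upperChar_eq_semicolon_iff c).mp h)
      rw [if_neg hc', if_neg hc]
      have := ih (c :: cur)
      simpa using this

theorem strip_map_upper (l : List Char) :
    PySem.Chars.strip (l.map PySem.Chars.upperChar)
      = (PySem.Chars.strip l).map PySem.Chars.upperChar := by
  unfold PySem.Chars.strip PySem.Chars.lstrip PySem.Chars.rstrip
  have hcomp : (PySem.Chars.isspace ∘ PySem.Chars.upperChar) = PySem.Chars.isspace := by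
    funext c; exact isspace_upperChar c
  rw [List.dropWhile_map, hcomp, ← List.map_reverse, List.dropWhile_map, hcomp, List.map_reverse]

-- infix decomposition across a separator not occurring in the pattern
theorem prefix_append_cons {p a b : List Char} {x : Char} (hx : x ∉ p) :
    p <+: a ++ x :: b → p <+: a := by
  induction a generalizing p with
  | nil =>
    intro h
    cases p with
    | nil => exact List.nil_prefix
    | cons q p' =>
      exfalso
      rcases List.cons_prefix_cons.mp h with ⟨rfl, -⟩
      exact hx List.mem_cons_self
  | cons c a' ih =>
    intro h
    cases p with
    | nil => exact List.nil_prefix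
    | cons q p' =>
      rcases List.cons_prefix_cons.mp h with ⟨rfl, h'⟩
      have hx' : x ∉ p' := fun hm => hx (List.mem_cons_of_mem _ hm)
      exact List.cons_prefix_cons.mpr ⟨rfl, ih hx' h'⟩

theorem infix_append_cons_iff {p a b : List Char} {x : Char} (hx : x ∉ p) :
    p <:+: a ++ x :: b ↔ p <:+: a ∨ p <:+: b := by
  constructor
  · intro h
    induction a generalizing p with
    | nil =>
      rcases List.infix_cons_iff.mp h with hpre | hinf
      · cases p with
        | nil => exact Or.inl (List.nil_infix)
        | cons q p' =>
          exfalso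
          rcases List.cons_prefix_cons.mp hpre with ⟨rfl, -⟩
          exact hx List.mem_cons_self
      · exact Or.inr hinf
    | cons c a' ih =>
      rcases List.infix_cons_iff.mp h with hpre | hinf
      · exact Or.inl (prefix_append_cons hx hpre).isInfix
      · rcases ih hx hinf with h1 | h2
        · exact Or.inl (h1.trans (List.suffix_cons c a').isInfix)
        · exact Or.inr h2
  · rintro (h | h)
    · exact h.trans ⟨[], x :: b, by simp⟩
    · exact h.trans ⟨a ++ [x], [], by simp⟩

theorem infix_split1 {p : List Char} (hp : ';' ∉ p) :
    ∀ (s cur : List Char), (p <:+: cur.reverse ++ s) ↔ ∃ t ∈ split1 s cur, p <:+: t := by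
  intro s
  induction s with
  | nil => intro cur; simp [split1]
  | cons c rest ih =>
    intro cur
    by_cases hc : c = ';'
    · subst hc
      rw [show split1 (';' :: rest) cur = cur.reverse :: split1 rest [] from by simp [split1]]
      rw [infix_append_cons_iff hp]
      have := ih ([] : List Char)
      simp only [List.reverse_nil, List.nil_append] at this
      simp [this]
    · rw [show split1 (c :: rest) cur = split1 rest (c :: cur) from by simp [split1, hc]]
      have := ih (c :: cur)
      simp only [List.reverse_cons, List.append_assoc, List.singleton_append] at this
      simpa using this

-- strip is an infix of the original
theorem strip_infix (t : List Char) : PySem.Chars.strip t <:+: t := by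
  unfold PySem.Chars.strip PySem.Chars.lstrip PySem.Chars.rstrip
  have h1 : (List.dropWhile PySem.Chars.isspace (List.dropWhile PySem.Chars.isspace t).reverse).reverse
      <+: List.dropWhile PySem.Chars.isspace t := by
    rw [← List.reverse_suffix]
    simp [List.dropWhile_suffix]
  exact h1.isInfix.trans (List.dropWhile_suffix _).isInfix

-- a pattern with no whitespace and ≠ [] survives stripping
theorem infix_dropWhile {p t : List Char} (hp : p ≠ [])
    (hsp : ∀ c ∈ p, PySem.Chars.isspace c = false) :
    p <:+: t → p <:+: List.dropWhile PySem.Chars.isspace t := by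
  induction t with
  | nil => intro h; simpa using h
  | cons c rest ih =>
    intro h
    by_cases hc : PySem.Chars.isspace c
    · rw [List.dropWhile_cons_of_pos hc]
      rcases List.infix_cons_iff.mp h with hpre | hinf
      · exfalso
        cases p with
        | nil => exact hp rfl
        | cons q p' =>
          rcases List.cons_prefix_cons.mp hpre with ⟨rfl, -⟩
          rw [hsp q List.mem_cons_self] at hc
          exact Bool.false_ne_true hc
      · exact ih hinf
    · rw [List.dropWhile_cons_of_neg hc]
      exact h

theorem infix_strip {p t : List Char} (hp : p ≠ [])
    (hsp : ∀ c ∈ p, PySem.Chars.isspace c = false) :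
    p <:+: t → p <:+: PySem.Chars.strip t := by
  intro h
  unfold PySem.Chars.strip PySem.Chars.lstrip PySem.Chars.rstrip
  have h1 : p <:+: List.dropWhile PySem.Chars.isspace t := infix_dropWhile hp hsp h
  have h2 : p.reverse <:+: (List.dropWhile PySem.Chars.isspace t).reverse :=
    List.reverse_infix.mpr h1
  have h3 : p.reverse <:+:
      List.dropWhile PySem.Chars.isspace (List.dropWhile PySem.Chars.isspace t).reverse :=
    infix_dropWhile (by simpa using hp)
      (fun c hc => hsp c (List.mem_reverse.mp hc)) h2
  have h4 := List.reverse_infix.mpr h3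
  simpa using h4

-- the central equivalence, on char lists, for one pattern
theorem main_pattern {p : List Char} (hp : p ≠ []) (hsemi : ';' ∉ p)
    (hsp : ∀ c ∈ p, PySem.Chars.isspace c = false) (l : List Char) :
    (∃ t ∈ split1 l [], p <:+: (PySem.Chars.strip t).map PySem.Chars.upperChar)
      ↔ p <:+: l.map PySem.Chars.upperChar := by
  constructor
  · rintro ⟨t, ht, hinf⟩
    have h1 : (PySem.Chars.strip t).map PySem.Chars.upperChar <:+: t.map PySem.Chars.upperChar :=
      (strip_infix t).map _
    have h2 : p <:+: t.map PySem.Chars.upperChar := hinf.trans h1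
    have h3 : t.map PySem.Chars.upperChar ∈ split1 (l.map PySem.Chars.upperChar) [] := by
      have := split1_upper l ([] : List Char)
      simp only [List.map_nil] at this
      rw [this]
      exact List.mem_map_of_mem ht
    have := (infix_split1 hsemi (l.map PySem.Chars.upperChar) []).mpr
      ⟨t.map PySem.Chars.upperChar, h3, h2⟩
    simpa using this
  · intro h
    have h0 : p <:+: ([] : List Char).reverse ++ l.map PySem.Chars.upperChar := by simpa using h
    rcases (infix_split1 hsemi (l.map PySem.Chars.upperChar) []).mp h0 with ⟨u, hu, hinf⟩
    have hsp1 : split1 (l.map PySem.Chars.upperChar) ([] : List Char)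
        = (split1 l []).map (List.map PySem.Chars.upperChar) := by
      have := split1_upper l ([] : List Char)
      simpa using this
    rw [hsp1] at hu
    rcases List.mem_map.mp hu with ⟨t, ht, rfl⟩
    refine ⟨t, ht, ?_⟩
    have := infix_strip hp hsp hinf
    rwa [strip_map_upper] at this

-- the five patterns, as char lists
def saAggsC : List (List Char) := saAggs.map String.toList

theorem saAggsC_props : ∀ p ∈ saAggsC, p ≠ [] ∧ ';' ∉ p ∧ ∀ c ∈ p, PySem.Chars.isspace c = false := by
  intro p hp
  have h : saAggsC = [['C','O','U','N','T','('], ['S','U','M','('], ['A','V','G','('],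
      ['M','I','N','('], ['M','A','X','(']] := by rfl
  rw [h] at hp
  fin_cases hp <;>
    exact ⟨by simp, by decide, by intro c hc; fin_cases hc <;> rfl⟩

-- A's loop is a bang-any
theorem saLoop_eq_any (xs : List String) :
    saLoop xs = !(xs.any (fun stmt => saAggs.any (fun agg => PySem.Str.isIn agg (PySem.Str.upper stmt)))) := by
  induction xs with
  | nil => rfl
  | cons stmt rest ih =>
    simp only [saLoop, List.any_cons]
    cases h : saAggs.any (fun agg => PySem.Str.isIn agg (PySem.Str.upper stmt)) with
    | true => simp
    | false => simp [ih]

theorem should_add_limit_py_spec' (sql : String) :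
    should_add_limit_py sql = should_add_limit_py_alt sql := by
  unfold should_add_limit_py should_add_limit_py_alt
  rw [saLoop_eq_any]
  apply congrArg
  -- reduce both anys to Prop over char lists
  apply Bool.eq_iff_iff.mpr
  simp only [List.any_eq_true, List.mem_filter, List.mem_map]
  constructor
  · rintro ⟨stmt, ⟨⟨s0, hs0, rfl⟩, -⟩, agg, hagg, hin⟩
    refine ⟨agg, hagg, ?_⟩
    -- move to char lists
    rw [PySem.Str.isIn_eq] at hin ⊢
    rw [PySem.Chars.isIn_iff_infix] at hin ⊢
    rw [PySem.Str.toList_upper] at hin ⊢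
    -- s0 comes from the split of sql
    have hsplit : (PySem.Str.split? sql ";").getD []
        = (split1 sql.toList []).map String.ofList := by
      simp [PySem.Str.split?, PySem.Chars.split?, splitOn_eq_split1]
    rw [hsplit] at hs0
    rcases List.mem_map.mp hs0 with ⟨t, ht, rfl⟩
    rw [PySem.Str.toList_strip] at hin
    have htl : (String.ofList t).toList = t := by simp
    rw [htl] at hin
    rcases saAggsC_props agg.toList (List.mem_map_of_mem hagg) with ⟨hp, hsemi, hsp⟩
    unfold PySem.Chars.upper at hin ⊢
    exact (main_pattern hp hsemi hsp sql.toList).mp ⟨t, ht, hin⟩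
  · rintro ⟨agg, hagg, hin⟩
    rw [PySem.Str.isIn_eq, PySem.Chars.isIn_iff_infix, PySem.Str.toList_upper] at hin
    rcases saAggsC_props agg.toList (List.mem_map_of_mem hagg) with ⟨hp, hsemi, hsp⟩
    unfold PySem.Chars.upper at hin
    rcases (main_pattern hp hsemi hsp sql.toList).mpr hin with ⟨t, ht, hinf⟩
    refine ⟨PySem.Str.strip (String.ofList t), ⟨⟨String.ofList t, ?_, rfl⟩, ?_⟩, agg, hagg, ?_⟩
    · have hsplit : (PySem.Str.split? sql ";").getD []
          = (split1 sql.toList []).map String.ofList := by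
        simp [PySem.Str.split?, PySem.Chars.split?, splitOn_eq_split1]
      rw [hsplit]
      exact List.mem_map_of_mem ht
    · -- strip nonempty: p ≠ [] is an infix of its upper image
      have hne : (PySem.Chars.strip t).map PySem.Chars.upperChar ≠ [] := by
        intro h0
        rw [h0] at hinf
        exact hp (List.infix_nil.mp hinf)
      simp only [ne_eq, List.map_eq_nil_iff] at hne
      simp only [PySem.Str.len_eq, PySem.Str.toList_strip, String.toList_ofList,
        Bool.not_eq_eq_eq_not, Bool.not_true]
      simpa using hne
    · rw [PySem.Str.isIn_eq, PySem.Chars.isIn_iff_infix, PySem.Str.toList_upper,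
        PySem.Str.toList_strip]
      have htl : (String.ofList t).toList = t := by simp
      rw [htl]
      unfold PySem.Chars.upper
      exact hinf

-- ===== VERDICT (by name: the statement is the Claim_ definition above) =====
theorem should_add_limit_py_spec : Claim_equal_should_add_limit_py := by
  intro sql _
  unfold Spec_should_add_limit_py
  exact should_add_limit_py_spec' sql
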